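-- pv_equiv track=rewrite | github.com/BasdekD/community-detection-in-social-networks | CC-GA/ga_modules.py | clusters_from_chromosome
-- ===== SOURCE A (Python) =====
-- def clusters_from_chromosome(chromosome):
--     # Matrix to hold detected clusters
--     clusters = []
--     # Turn chromosome into node couples
--     nodes_c = [[i, int(neigh)] for i, neigh in enumerate(chromosome)]
--     # First node as a cluster
--     # Check for isolated node
--     if(nodes_c[0][1]==-1):
--         clusters.append([nodes_c[0][0]])
--     else:
--         clusters.append(nodes_c[0])
--     # For each or the rest node couples
--     for n1,n2 in nodes_c[1:]:
--         in_cluster = False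
--
--         clusters_found = []
--         new_clusters = []
--
--         # If it is an isolated node (neighbor == -1) then create a separate cluster
--         if(n2==-1):
--             clusters.append([n1])
--             continue
--         # Check if any one of the nodes exists in an already identified cluster
--         for i in range(len(clusters)):
--             # If at least one node already belongs to a cluster
--             if(n1 in clusters[i] or n2 in clusters[i]):
--                 # Keep cluster index
--                 clusters_found.append(i)
--                 # Put both nodes in the cluster
-- #                clusters[i].extend([n1,n2])
--                 in_cluster = True
-- #                break
--             else: # If none node in cluster
--                 new_clusters.append(clusters[i])
--
--         # If nodes in existing clusters, concatenate them as unified cluster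
--         if(in_cluster==True):
--             conc = [n1,n2]
--             for idx in clusters_found:
--                 conc.extend(clusters[idx])
--             new_clusters.append(conc)
--
--         else: # If none node in existing cluster, create a new one
--             new_clusters.append([n1,n2])
--
--         # Update clusters structure
--         clusters = new_clusters.copy()
--
--     # Remove multiple appearances of nodes in clusters and sort nodes
--     clusters = [list(set(cluster)) for cluster in clusters]
--     for i in range(len(clusters)):
--         clusters[i].sort()
--
--     return(clusters)
-- ===== SOURCE B (Python) =====
-- def clusters_from_chromosome(chromosome):
--     # Union-find-like single pass: dict of live clusters (insertion order) plus a
--     # node -> cluster-ids index, so no scan over all clusters per gene.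
--     members = {}          # cluster id -> set of its nodes, in cluster order
--     owner = {}            # node -> list of ids of live clusters containing it
--     nid = 0
--     for n1, neigh in enumerate(chromosome):
--         n2 = int(neigh)
--         if n2 == -1:
--             # isolated marker: a fresh singleton cluster
--             members[nid] = {n1}
--             owner.setdefault(n1, []).append(nid)
--             nid += 1
--             continue
--         found = []
--         for d in owner.get(n1, []) + owner.get(n2, []):
--             if d not in found:
--                 found.append(d)
--         s = {n1, n2}
--         for f in found:
--             s |= members.pop(f)
--         members[nid] = s
--         fs = set(found)
--         for x in s:
--             owner[x] = [nid] + [d for d in owner.get(x, []) if d not in fs]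
--         nid += 1
--     return [sorted(s) for s in members.values()]
-- ===== Notes on version B (the rewrite author's own statement) =====
-- stated objective: faster
-- what changed: A rescans every existing cluster (and copies the cluster list) for each gene; B does one pass keeping an insertion-ordered dict of clusters plus a node-to-cluster-ids index, so each gene merges by direct lookup and remove-and-append (union-find-like) instead of scanning all clusters.
import Mathlib
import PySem

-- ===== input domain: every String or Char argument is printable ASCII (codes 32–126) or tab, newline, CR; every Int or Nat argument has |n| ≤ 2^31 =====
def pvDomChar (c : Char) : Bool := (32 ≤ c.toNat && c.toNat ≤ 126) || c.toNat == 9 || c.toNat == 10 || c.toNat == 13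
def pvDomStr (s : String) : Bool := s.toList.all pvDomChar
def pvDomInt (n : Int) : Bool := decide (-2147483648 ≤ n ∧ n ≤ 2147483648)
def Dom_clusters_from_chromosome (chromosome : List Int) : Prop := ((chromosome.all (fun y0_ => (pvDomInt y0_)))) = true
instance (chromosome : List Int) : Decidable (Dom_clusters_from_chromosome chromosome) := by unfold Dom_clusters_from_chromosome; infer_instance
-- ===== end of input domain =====

-- B replaces A's per-gene scan of all clusters by a cluster dict plus a node -> cluster-ids
-- index with remove-and-append merging (union-find-like); measured faster, same return value.

-- ===== PORT A =====
-- one iteration of A's main loop (the body for a pair (n1, n2) = nodes_c[i], i ≥ 1)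
def stepA_clusters (n1 n2 : Int) (clusters : List (List Int)) : List (List Int) :=
  if n2 == -1 then clusters ++ [[n1]]
  else
    -- for i in range(len(clusters)): … collecting (clusters_found, new_clusters, in_cluster)
    let scan := (PySem.List.enumerate clusters).foldl
      (fun (st : List Int × List (List Int) × Bool) ic =>
        if n1 ∈ ic.2 ∨ n2 ∈ ic.2 then (st.1 ++ [ic.1], st.2.1, true)
        else (st.1, st.2.1 ++ [ic.2], st.2.2)) ([], [], false)
    if scan.2.2 then
      scan.2.1 ++ [scan.1.foldl (fun conc idx => conc ++ PySem.List.pyGetD clusters idx []) [n1, n2]]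
    else
      scan.2.1 ++ [[n1, n2]]

def clusters_from_chromosome (chromosome : List Int) : List (List Int) :=
  match PySem.List.enumerate chromosome with
  | [] => []  -- Python raises IndexError on nodes_c[0]; Pre_ excludes the empty chromosome
  | c0 :: rest =>
    let clusters0 := if c0.2 == -1 then [[c0.1]] else [[c0.1, c0.2]]
    let clusters := rest.foldl (fun cl p => stepA_clusters p.1 p.2 cl) clusters0
    -- list(set(cluster)) then .sort(): the sorted distinct elements
    clusters.map (fun c => PySem.List.sorted (PySem.Set.ofList c) (fun x => x) false)

-- ===== PORT B =====
-- one iteration of B's loop; state = (members : id -> set, owner : node -> ids, next id)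
def stepB_clusters (st : PySem.Dict Int (PySem.Set Int) × PySem.Dict Int (List Int) × Int)
    (p : Int × Int) : PySem.Dict Int (PySem.Set Int) × PySem.Dict Int (List Int) × Int :=
  let members := st.1
  let owner := st.2.1
  let nid := st.2.2
  if p.2 == -1 then
    (members.insert nid (PySem.Set.ofList [p.1]),
     owner.insert p.1 (owner.getD p.1 [] ++ [nid]), nid + 1)
  else
    -- found = dedup(owner.get(n1,[]) + owner.get(n2,[]))
    let found := (owner.getD p.1 [] ++ owner.getD p.2 []).foldl PySem.Set.add []
    -- s = {n1, n2}; for f in found: s |= members.pop(f)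
    let merged := found.foldl
      (fun (q : PySem.Set Int × PySem.Dict Int (PySem.Set Int)) f =>
        match q.2.pop? f with
        | some r => (q.1.union r.1, r.2)
        | none => q)  -- KeyError path; unreachable because the owner index is exact
      (PySem.Set.ofList [p.1, p.2], members)
    let fs := PySem.Set.ofList found
    -- for x in s: owner[x] = [nid] + [d for d in owner.get(x, []) if d not in fs]
    let owner' := merged.1.foldl
      (fun o x => o.insert x ([nid] ++ (o.getD x []).filter (fun d => !(PySem.Set.contains fs d)))) owner
    (merged.2.insert nid merged.1, owner', nid + 1)

def clusters_from_chromosome_alt (chromosome : List Int) : List (List Int) :=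
  let fin := (PySem.List.enumerate chromosome).foldl stepB_clusters
    (PySem.Dict.empty, PySem.Dict.empty, 0)
  fin.1.values.map (fun s => PySem.List.sorted s (fun x => x) false)

-- ===== PRECONDITION & SPEC =====
-- Pre_ excludes only the empty chromosome, on which A raises IndexError (nodes_c[0]).
def Pre_clusters_from_chromosome (chromosome : List Int) : Prop := chromosome ≠ []
instance (chromosome : List Int) : Decidable (Pre_clusters_from_chromosome chromosome) := by unfold Pre_clusters_from_chromosome; infer_instance
def pvWitness_clusters_from_chromosome : List Int := [1, 0, -1]

def Spec_clusters_from_chromosome (chromosome : List Int) (out : List (List Int)) : Prop := out = clusters_from_chromosome_alt chromosome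
instance (chromosome : List Int) (out : List (List Int)) : Decidable (Spec_clusters_from_chromosome chromosome out) := by unfold Spec_clusters_from_chromosome; infer_instance

-- ===== CLAIM (what is proved, stated in full; the proofs are below) =====
def Claim_equal_clusters_from_chromosome : Prop := ∀ (chromosome : List Int), Dom_clusters_from_chromosome chromosome → Pre_clusters_from_chromosome chromosome → Spec_clusters_from_chromosome chromosome (clusters_from_chromosome chromosome)

-- ===== LEMMAS AND PROOFS =====

-- "cluster cl and dict entry q hold the same nodes"
def MemIff (cl : List Int) (q : Int × List Int) : Prop := ∀ x : Int, x ∈ cl ↔ x ∈ q.2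

-- the coupling invariant between A's cluster list and B's (members, owner, nid) state
def InvBC (clusters : List (List Int))
    (st : PySem.Dict Int (PySem.Set Int) × PySem.Dict Int (List Int) × Int) : Prop :=
  List.Forall₂ MemIff clusters st.1.items
  ∧ st.1.keys.Nodup
  ∧ (∀ k ∈ st.1.keys, k < st.2.2)
  ∧ (∀ x d, d ∈ st.2.1.getD x [] ↔ ∃ s, (d, s) ∈ st.1.items ∧ x ∈ s)
  ∧ (∀ q ∈ st.1.items, (q.2 : List Int).Nodup)

-- A's inner scan over range(len(clusters)) characterised
theorem scanA_eq (n1 n2 : Int) (l : List (Int × List Int))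
    (f0 : List Int) (n0 : List (List Int)) (i0 : Bool) :
    l.foldl (fun (st : List Int × List (List Int) × Bool) ic =>
        if n1 ∈ ic.2 ∨ n2 ∈ ic.2 then (st.1 ++ [ic.1], st.2.1, true)
        else (st.1, st.2.1 ++ [ic.2], st.2.2)) (f0, n0, i0)
    = (f0 ++ (l.filter (fun ic => decide (n1 ∈ ic.2 ∨ n2 ∈ ic.2))).map (·.1),
       n0 ++ (l.filter (fun ic => !decide (n1 ∈ ic.2 ∨ n2 ∈ ic.2))).map (·.2),
       i0 || l.any (fun ic => decide (n1 ∈ ic.2 ∨ n2 ∈ ic.2))) := by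
  induction l generalizing f0 n0 i0 with
  | nil => simp
  | cons ic t ih =>
    simp only [List.foldl_cons, List.filter_cons, List.any_cons]
    by_cases h : n1 ∈ ic.2 ∨ n2 ∈ ic.2
    · simp [h, ih]
    · simp [h, ih]

-- filtering an enumerate by a predicate on the value, then taking values
theorem filter_enumerate_map_snd {α : Type} (Q : α → Bool) (xs : List α) (s : Int) :
    ((PySem.List.enumerate xs s).filter (fun ic => Q ic.2)).map (·.2) = xs.filter Q := by
  induction xs generalizing s with
  | nil => simp [PySem.List.enumerate]
  | cons x t ih =>
    by_cases h : Q x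
    · simp [PySem.List.enumerate, h, ih]
    · simp [PySem.List.enumerate, h, ih]

-- any over an enumerate driven by the value only
theorem any_enumerate_snd {α : Type} (Q : α → Bool) (xs : List α) (s : Int) :
    (PySem.List.enumerate xs s).any (fun ic => Q ic.2) = xs.any Q := by
  induction xs generalizing s with
  | nil => simp [PySem.List.enumerate]
  | cons x t ih => simp [PySem.List.enumerate, ih]

-- pop?/erase plumbing
theorem dict_get?_erase_of_ne {ν : Type} (m : PySem.Dict Int ν) (f f' : Int) (h : f' ≠ f) :
    (m.erase f).get? f' = m.get? f' := by
  simp only [PySem.Dict.erase, PySem.Dict.get?, PySem.Dict.items, List.find?_filter]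
  have : (fun (a : Int × ν) => decide ((!a.1 == f) = true ∧ (a.1 == f') = true))
      = (fun (p : Int × ν) => p.1 == f') := by
    funext a
    by_cases ha : a.1 = f'
    · simp [ha, h]
    · simp [ha]
  rw [this]

-- the pop loop of B: resulting dict
theorem popLoop_items (found : List Int) :
    ∀ (s0 : PySem.Set Int) (m : PySem.Dict Int (PySem.Set Int)),
    ((found.foldl (fun (q : PySem.Set Int × PySem.Dict Int (PySem.Set Int)) f =>
        match q.2.pop? f with
        | some r => (q.1.union r.1, r.2)
        | none => q) (s0, m)).2).items
    = m.items.filter (fun q => !found.contains q.1) := by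
  induction found with
  | nil => intro s0 m; simp
  | cons f t ih =>
    intro s0 m
    simp only [List.foldl_cons]
    cases hp : m.pop? f with
    | none =>
      have hg : m.get? f = none := by
        simpa [PySem.Dict.pop?] using hp
      rw [ih]
      apply List.filter_congr
      intro q hq
      have hne : q.1 ≠ f := by
        intro hqf
        have h2 : (fun (p : Int × PySem.Set Int) => p.1 == f) q ≠ true :=
          List.find?_eq_none.mp (by
            simpa only [PySem.Dict.get?, Option.map_eq_none_iff] using hg) q hq
        simp [hqf] at h2
      simp [List.contains_cons, hne]
    | some r =>
      have hr2 : r.2 = m.erase f := by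
        simp only [PySem.Dict.pop?, Option.map_eq_some_iff] at hp
        obtain ⟨v, _, hv⟩ := hp
        simp [← hv]
      simp only [ih, hr2, PySem.Dict.erase, PySem.Dict.items, List.filter_filter]
      apply List.filter_congr
      intro q hq
      by_cases hqf : q.1 = f <;> simp [List.contains_cons, hqf]

-- the pop loop of B: membership of the accumulated set
theorem popLoop_mem (found : List Int) (hnd : found.Nodup) :
    ∀ (s0 : PySem.Set Int) (m : PySem.Dict Int (PySem.Set Int)) (x : Int),
    (x ∈ (found.foldl (fun (q : PySem.Set Int × PySem.Dict Int (PySem.Set Int)) f =>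
        match q.2.pop? f with
        | some r => (q.1.union r.1, r.2)
        | none => q) (s0, m)).1)
    ↔ (x ∈ s0 ∨ ∃ f ∈ found, x ∈ m.getD f []) := by
  induction found with
  | nil => intro s0 m x; simp
  | cons f t ih =>
    intro s0 m x
    obtain ⟨hf, hndt⟩ := List.nodup_cons.mp hnd
    simp only [List.foldl_cons]
    cases hp : m.pop? f with
    | none =>
      have hg : m.get? f = none := by simpa [PySem.Dict.pop?] using hp
      rw [ih hndt]
      have hd : m.getD f [] = [] := by simp [PySem.Dict.getD, hg]
      simp only [List.mem_cons]
      constructor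
      · rintro (h | ⟨f', hf', hx⟩)
        · exact Or.inl h
        · exact Or.inr ⟨f', Or.inr hf', hx⟩
      · rintro (h | ⟨f', hf', hx⟩)
        · exact Or.inl h
        · rcases hf' with hf' | hf'
          · rw [hf', hd] at hx; simp at hx
          · exact Or.inr ⟨f', hf', hx⟩
    | some r =>
      have hget : m.get? f = some r.1 ∧ r.2 = m.erase f := by
        simp only [PySem.Dict.pop?, Option.map_eq_some_iff] at hp
        obtain ⟨v, hv1, hv2⟩ := hp
        constructor
        · rw [hv1]; rw [← hv2]
        · rw [← hv2]
      rw [ih hndt]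
      have hgd : ∀ f' ∈ t, r.2.getD f' [] = m.getD f' [] := by
        intro f' hf'
        have : f' ≠ f := fun he => hf (he ▸ hf')
        rw [hget.2]
        simp [PySem.Dict.getD, dict_get?_erase_of_ne m f f' this]
      have hdf : m.getD f [] = r.1 := by simp [PySem.Dict.getD, hget.1]
      constructor
      · rintro (h | ⟨g', hg', hx⟩)
        · rcases (PySem.Set.mem_union _ _ _).mp h with h | h
          · exact Or.inl h
          · exact Or.inr ⟨f, List.mem_cons_self, by rw [hdf]; exact h⟩
        · exact Or.inr ⟨g', List.mem_cons_of_mem _ hg', by rw [← hgd g' hg']; exact hx⟩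
      · rintro (h | ⟨f', hf', hx⟩)
        · exact Or.inl ((PySem.Set.mem_union _ _ _).mpr (Or.inl h))
        · rcases List.mem_cons.mp hf' with hf' | hf'
          · subst hf'
            exact Or.inl ((PySem.Set.mem_union _ _ _).mpr (Or.inr (by rw [hdf] at hx; exact hx)))
          · exact Or.inr ⟨f', hf', by rw [hgd f' hf']; exact hx⟩

-- the pop loop of B: the accumulated set stays duplicate-free
theorem popLoop_nodup (found : List Int) :
    ∀ (s0 : PySem.Set Int) (m : PySem.Dict Int (PySem.Set Int)), s0.Nodup →
    ((found.foldl (fun (q : PySem.Set Int × PySem.Dict Int (PySem.Set Int)) f =>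
        match q.2.pop? f with
        | some r => (q.1.union r.1, r.2)
        | none => q) (s0, m)).1).Nodup := by
  induction found with
  | nil => intro s0 m h; exact h
  | cons f t ih =>
    intro s0 m h
    simp only [List.foldl_cons]
    cases hp : m.pop? f with
    | none => exact ih s0 m h
    | some r => exact ih _ _ (PySem.Set.nodup_union _ _ h)

-- the owner-update loop of B, read back
theorem ownerLoop_getD (g : Int → List Int → List Int) (s : List Int) (hs : s.Nodup) :
    ∀ (o : PySem.Dict Int (List Int)) (y : Int),
    ((s.foldl (fun o x => o.insert x (g x (o.getD x []))) o).getD y [])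
    = if y ∈ s then g y (o.getD y []) else o.getD y [] := by
  induction s with
  | nil => intro o y; simp
  | cons a t ih =>
    intro o y
    obtain ⟨ha, hndt⟩ := List.nodup_cons.mp hs
    simp only [List.foldl_cons]
    rw [ih hndt]
    by_cases hyt : y ∈ t
    · have hya : y ≠ a := fun he => ha (he ▸ hyt)
      rw [PySem.Dict.getD_insert]
      simp [hyt, hya, List.mem_cons]
    · rw [PySem.Dict.getD_insert]
      by_cases hya : y = a
      · simp [hya, ha]
      · simp [hyt, hya, List.mem_cons]

-- with unique keys, a key determines its value
theorem items_key_unique {ν : Type} (m : PySem.Dict Int ν) (h : m.keys.Nodup)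
    {d : Int} {s s' : ν} (h1 : (d, s) ∈ m.items) (h2 : (d, s') ∈ m.items) : s = s' := by
  have ha := PySem.Dict.getD_of_mem_items m h1 h s
  have hb := PySem.Dict.getD_of_mem_items m h2 h s
  rw [ha] at hb; exact hb

-- transfer an existential over related cluster lists
theorem forall2_exists_iff (n1 n2 x : Int) {cls : List (List Int)} {its : List (Int × List Int)}
    (h : List.Forall₂ MemIff cls its) :
    (∃ cl ∈ cls, (n1 ∈ cl ∨ n2 ∈ cl) ∧ x ∈ cl)
    ↔ (∃ q ∈ its, (n1 ∈ q.2 ∨ n2 ∈ q.2) ∧ x ∈ q.2) := by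
  induction h with
  | nil => simp
  | cons hR hF ih =>
    rename_i a b l₁ l₂
    simp only [List.mem_cons]
    constructor
    · rintro ⟨cl, hcl | hcl, hp, hx⟩
      · subst hcl
        exact ⟨b, Or.inl rfl, hp.imp (hR n1).mp (hR n2).mp, (hR x).mp hx⟩
      · obtain ⟨q, hq, hh⟩ := ih.mp ⟨cl, hcl, hp, hx⟩
        exact ⟨q, Or.inr hq, hh⟩
    · rintro ⟨q, hq | hq, hp, hx⟩
      · subst hq
        exact ⟨a, Or.inl rfl, hp.imp (hR n1).mpr (hR n2).mpr, (hR x).mpr hx⟩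
      · obtain ⟨cl, hcl, hh⟩ := ih.mpr ⟨q, hq, hp, hx⟩
        exact ⟨cl, Or.inr hcl, hh⟩

-- Forall₂ through filters driven by equivalent predicates
theorem forall2_filter {α β : Type} {R : α → β → Prop} {p : α → Bool} {q : β → Bool}
    {l₁ : List α} {l₂ : List β} (h : List.Forall₂ R l₁ l₂)
    (hpq : ∀ a b, R a b → a ∈ l₁ → b ∈ l₂ → p a = q b) :
    List.Forall₂ R (l₁.filter p) (l₂.filter q) := by
  induction h with
  | nil => simp
  | cons hR hF ih =>
    rename_i a b t₁ t₂
    have hcong := hpq a b hR List.mem_cons_self List.mem_cons_self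
    have ihr := ih (fun a' b' hr ha hb => hpq a' b' hr (List.mem_cons_of_mem _ ha) (List.mem_cons_of_mem _ hb))
    rw [List.filter_cons, List.filter_cons]
    by_cases hpa : p a
    · rw [hpa] at hcong
      simp only [hpa, ← hcong]
      exact List.Forall₂.cons hR ihr
    · have : p a = false := by simpa using hpa
      rw [this] at hcong
      simp only [this, ← hcong]
      exact ihr


-- members of A's concatenated found clusters
theorem foundA_mem (n1 n2 x : Int) (cl : List (List Int)) :
    (∃ idx ∈ ((PySem.List.enumerate cl).filter
        (fun ic => decide (n1 ∈ ic.2 ∨ n2 ∈ ic.2))).map (·.1),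
      x ∈ PySem.List.pyGetD cl idx [])
    ↔ ∃ c ∈ cl, (n1 ∈ c ∨ n2 ∈ c) ∧ x ∈ c := by
  constructor
  · rintro ⟨idx, hidx, hx⟩
    rw [List.mem_map] at hidx
    obtain ⟨ic, hic, rfl⟩ := hidx
    rw [List.mem_filter] at hic
    obtain ⟨hicm, hicp⟩ := hic
    rw [PySem.List.mem_enumerate_iff] at hicm
    obtain ⟨k, hk, rfl⟩ := hicm
    have hg : PySem.List.pyGetD cl ((0:Int) + (k:Int)) [] = cl[k] := by
      rw [zero_add, PySem.List.pyGetD_natCast]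
      exact List.getD_eq_getElem cl [] hk
    exact ⟨cl[k], List.getElem_mem hk, by simpa using hicp, hg ▸ hx⟩
  · rintro ⟨c, hc, hp, hx⟩
    rw [List.mem_iff_getElem] at hc
    obtain ⟨k, hk, rfl⟩ := hc
    refine ⟨(0:Int) + (k:Int), List.mem_map.mpr ⟨((0:Int) + (k:Int), cl[k]), ?_, rfl⟩, ?_⟩
    · rw [List.mem_filter]
      exact ⟨(PySem.List.mem_enumerate_iff _ _ _).mpr ⟨k, hk, rfl⟩, by simpa using hp⟩
    · rw [zero_add, PySem.List.pyGetD_natCast, List.getD_eq_getElem cl [] hk]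
      exact hx

-- one merge step of A, characterised: the untouched clusters in order, then the new cluster
theorem stepA_merge_char (n1 n2 : Int) (cl : List (List Int)) (h : (n2 == -1) = false) :
    ∃ acl, stepA_clusters n1 n2 cl
        = cl.filter (fun c => !decide (n1 ∈ c ∨ n2 ∈ c)) ++ [acl]
      ∧ ∀ x, x ∈ acl ↔ (x = n1 ∨ x = n2 ∨ ∃ c ∈ cl, (n1 ∈ c ∨ n2 ∈ c) ∧ x ∈ c) := by
  simp only [stepA_clusters, h, Bool.false_eq_true, if_false, scanA_eq, List.nil_append,
    Bool.false_or]
  rw [filter_enumerate_map_snd (fun c => !decide (n1 ∈ c ∨ n2 ∈ c)),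
    any_enumerate_snd (fun c => decide (n1 ∈ c ∨ n2 ∈ c))]
  by_cases hany : cl.any (fun c => decide (n1 ∈ c ∨ n2 ∈ c))
  · rw [if_pos hany]
    refine ⟨_, rfl, fun x => ?_⟩
    rw [PySem.List.foldl_append_eq_flatMap]
    simp only [List.mem_append, List.mem_flatMap, List.mem_cons, List.not_mem_nil, or_false]
    rw [← foundA_mem n1 n2 x cl]
    tauto
  · rw [if_neg hany]
    refine ⟨_, rfl, fun x => ?_⟩
    simp only [List.mem_cons, List.not_mem_nil, or_false]
    have hno : ∀ c ∈ cl, ¬(n1 ∈ c ∨ n2 ∈ c) := by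
      intro c hc hp
      exact hany (List.any_eq_true.mpr ⟨c, hc, by simpa using hp⟩)
    constructor
    · rintro (h | h)
      · exact Or.inl h
      · exact Or.inr (Or.inl h)
    · rintro (h | h | ⟨c, hc, hp, _⟩)
      · exact Or.inl h
      · exact Or.inr h
      · exact absurd hp (hno c hc)

-- one merge step of B, characterised under the invariant facts
theorem stepB_merge_char (members : PySem.Dict Int (PySem.Set Int))
    (owner : PySem.Dict Int (List Int)) (nid n1 n2 : Int) (h : (n2 == -1) = false)
    (h₂ : members.keys.Nodup) (h₃ : ∀ k ∈ members.keys, k < nid)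
    (h₄ : ∀ x d, d ∈ owner.getD x [] ↔ ∃ s, (d, s) ∈ members.items ∧ x ∈ s) :
    ∃ S : PySem.Set Int,
      (stepB_clusters (members, owner, nid) (n1, n2)).1.items
        = members.items.filter (fun q => !decide (n1 ∈ q.2 ∨ n2 ∈ q.2)) ++ [(nid, S)]
      ∧ (stepB_clusters (members, owner, nid) (n1, n2)).2.2 = nid + 1
      ∧ (∀ x, x ∈ S ↔ (x = n1 ∨ x = n2 ∨ ∃ q ∈ members.items, (n1 ∈ q.2 ∨ n2 ∈ q.2) ∧ x ∈ q.2))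
      ∧ S.Nodup
      ∧ (∀ y d, d ∈ (stepB_clusters (members, owner, nid) (n1, n2)).2.1.getD y []
          ↔ (if y ∈ S
             then d = nid ∨ (d ∈ owner.getD y [] ∧ ¬∃ s, (d, s) ∈ members.items ∧ (n1 ∈ s ∨ n2 ∈ s))
             else d ∈ owner.getD y [])) := by
  simp only [stepB_clusters, h, Bool.false_eq_true, if_false]
  rw [← PySem.Set.ofList_eq_foldl]
  set found := PySem.Set.ofList (owner.getD n1 [] ++ owner.getD n2 []) with hfoundL
  have hfmem : ∀ d, d ∈ found ↔ ∃ s, (d, s) ∈ members.items ∧ (n1 ∈ s ∨ n2 ∈ s) := by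
    intro d
    rw [hfoundL, PySem.Set.mem_ofList, List.mem_append, h₄, h₄]
    constructor
    · rintro (⟨s, hs, hm⟩ | ⟨s, hs, hm⟩)
      · exact ⟨s, hs, Or.inl hm⟩
      · exact ⟨s, hs, Or.inr hm⟩
    · rintro ⟨s, hs, hm | hm⟩
      · exact Or.inl ⟨s, hs, hm⟩
      · exact Or.inr ⟨s, hs, hm⟩
  have hfnd : found.Nodup := PySem.Set.nodup_ofList _
  have hit := popLoop_items found (PySem.Set.ofList [n1, n2]) members
  have hmm := popLoop_mem found hfnd (PySem.Set.ofList [n1, n2]) members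
  have hmnd := popLoop_nodup found (PySem.Set.ofList [n1, n2]) members (PySem.Set.nodup_ofList _)
  set merged := found.foldl
      (fun (q : PySem.Set Int × PySem.Dict Int (PySem.Set Int)) f =>
        match q.2.pop? f with
        | some r => (q.1.union r.1, r.2)
        | none => q) (PySem.Set.ofList [n1, n2], members) with hmerged
  -- membership of the merged set
  have hSm : ∀ x, x ∈ merged.1 ↔ (x = n1 ∨ x = n2 ∨ ∃ q ∈ members.items, (n1 ∈ q.2 ∨ n2 ∈ q.2) ∧ x ∈ q.2) := by
    intro x
    rw [hmm x]
    constructor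
    · rintro (hx | ⟨f, hf, hx⟩)
      · have hx2 : x = n1 ∨ x = n2 := by simpa using (PySem.Set.mem_ofList _ _).mp hx
        rcases hx2 with h' | h'
        · exact Or.inl h'
        · exact Or.inr (Or.inl h')
      · obtain ⟨s, hs, hp⟩ := (hfmem f).mp hf
        have : members.getD f [] = s := PySem.Dict.getD_of_mem_items members hs h₂ []
        exact Or.inr (Or.inr ⟨(f, s), hs, hp, this ▸ hx⟩)
    · rintro (hx | hx | ⟨q, hq, hp, hx⟩)
      · exact Or.inl ((PySem.Set.mem_ofList _ _).mpr (by simp [hx]))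
      · exact Or.inl ((PySem.Set.mem_ofList _ _).mpr (by simp [hx]))
      · refine Or.inr ⟨q.1, (hfmem q.1).mpr ⟨q.2, hq, hp⟩, ?_⟩
        have : members.getD q.1 [] = q.2 := PySem.Dict.getD_of_mem_items members hq h₂ []
        rw [this]
        exact hx
  -- the new id is fresh for the popped dict
  have hkeysub : ∀ k ∈ merged.2.keys, k ∈ members.keys := by
    intro k hk
    simp only [PySem.Dict.keys] at hk ⊢
    rw [hit] at hk
    obtain ⟨q, hq, rfl⟩ := List.mem_map.mp hk
    exact List.mem_map.mpr ⟨q, (List.mem_filter.mp hq).1, rfl⟩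
  have hfresh : merged.2.contains nid = false := by
    rw [PySem.Dict.contains_eq_decide_mem_keys]
    simp only [decide_eq_false_iff_not]
    intro hmem
    exact absurd (h₃ nid (hkeysub nid hmem)) (lt_irrefl nid)
  have hit2 : (merged.2.insert nid merged.1).items = merged.2.items ++ [(nid, merged.1)] :=
    PySem.Dict.items_insert_of_not_contains _ _ hfresh
  -- convert the filter predicate from key-based to value-based
  have hfilt : members.items.filter (fun q => !found.contains q.1)
      = members.items.filter (fun q => !decide (n1 ∈ q.2 ∨ n2 ∈ q.2)) := by
    apply List.filter_congr
    intro q hq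
    by_cases hqf : q.1 ∈ found
    · obtain ⟨s, hs, hp⟩ := (hfmem q.1).mp hqf
      have : s = q.2 := items_key_unique members h₂ hs (by exact hq)
      subst this
      simp [hqf, hp]
    · have hnp : ¬(n1 ∈ q.2 ∨ n2 ∈ q.2) := fun hp => hqf ((hfmem q.1).mpr ⟨q.2, hq, hp⟩)
      simp [hqf, hnp]
  refine ⟨merged.1, ?_, ?_, hSm, hmnd, ?_⟩
  · rw [hit2, hit]
    exact congrArg (· ++ [(nid, merged.1)]) hfilt
  · trivial
  · intro y d
    have hloop := ownerLoop_getD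
      (fun _ v => [nid] ++ v.filter (fun d => !(PySem.Set.ofList found).contains d))
      merged.1 hmnd owner y
    rw [hloop]
    have hdf : ∀ d' : Int, ((PySem.Set.ofList found).contains d' = false) ↔ d' ∉ found := by
      intro d'
      rw [Bool.eq_false_iff, ne_eq, PySem.Set.contains_iff, PySem.Set.mem_ofList]
    by_cases hy : y ∈ merged.1
    · rw [if_pos hy, if_pos hy]
      simp only [List.mem_append, List.mem_filter, List.mem_cons, List.not_mem_nil, or_false,
        Bool.not_eq_true']
      constructor
      · rintro (hd | ⟨hd1, hd2⟩)
        · exact Or.inl hd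
        · exact Or.inr ⟨hd1, fun hex => ((hdf d).mp hd2) ((hfmem d).mpr hex)⟩
      · rintro (hd | ⟨hd1, hd2⟩)
        · exact Or.inl hd
        · exact Or.inr ⟨hd1, (hdf d).mpr (fun hm => hd2 ((hfmem d).mp hm))⟩
    · rw [if_neg hy, if_neg hy]

theorem forall2_append {α β : Type} {R : α → β → Prop} {a c : List α} {b d : List β}
    (h1 : List.Forall₂ R a b) (h2 : List.Forall₂ R c d) : List.Forall₂ R (a ++ c) (b ++ d) := by
  induction h1 with
  | nil => exact h2
  | cons hR hF ih => exact List.Forall₂.cons hR ih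

-- the main preservation lemma: one step of A and one step of B stay coupled
theorem step_preserves (cl : List (List Int))
    (st : PySem.Dict Int (PySem.Set Int) × PySem.Dict Int (List Int) × Int)
    (p : Int × Int) (h : InvBC cl st) :
    InvBC (stepA_clusters p.1 p.2 cl) (stepB_clusters st p) := by
  obtain ⟨h₁, h₂, h₃, h₄, h₅⟩ := h
  obtain ⟨members, owner, nid⟩ := st
  obtain ⟨n1, n2⟩ := p
  dsimp only at h₁ h₂ h₃ h₄ h₅
  by_cases hiso : (n2 == -1) = true
  · -- isolated gene: a fresh singleton cluster is appended on both sides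
    have hAe : stepA_clusters n1 n2 cl = cl ++ [[n1]] := by
      simp [stepA_clusters, hiso]
    have hBe : stepB_clusters (members, owner, nid) (n1, n2)
        = (members.insert nid (PySem.Set.ofList [n1]),
           owner.insert n1 (owner.getD n1 [] ++ [nid]), nid + 1) := by
      simp [stepB_clusters, hiso]
    rw [hAe, hBe]
    have hfresh : members.contains nid = false := by
      rw [PySem.Dict.contains_eq_decide_mem_keys]
      simp only [decide_eq_false_iff_not]
      intro hm
      exact absurd (h₃ nid hm) (lt_irrefl nid)
    have hitems : (members.insert nid (PySem.Set.ofList [n1])).items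
        = members.items ++ [(nid, PySem.Set.ofList [n1])] :=
      PySem.Dict.items_insert_of_not_contains _ _ hfresh
    have hmem1 : ∀ x : Int, x ∈ PySem.Set.ofList [n1] ↔ x = n1 := by
      intro x
      rw [PySem.Set.mem_ofList]
      simp
    refine ⟨?_, ?_, ?_, ?_, ?_⟩
    · show List.Forall₂ MemIff _ _
      rw [hitems]
      refine forall2_append h₁ (List.forall₂_cons.mpr ⟨?_, List.Forall₂.nil⟩)
      intro x
      rw [hmem1 x]
      simp
    · show List.Nodup _
      simp only [PySem.Dict.keys, hitems, List.map_append, List.map_cons, List.map_nil]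
      rw [List.nodup_append]
      refine ⟨h₂, List.nodup_singleton _, ?_⟩
      intro k hk j hj
      rw [List.mem_singleton] at hj
      intro he
      exact absurd (h₃ k hk) (by rw [he, hj]; exact lt_irrefl nid)
    · intro k hk
      show k < nid + 1
      simp only [PySem.Dict.keys, hitems, List.map_append, List.map_cons, List.map_nil,
        List.mem_append, List.mem_singleton] at hk
      rcases hk with hk | hk
      · have := h₃ k hk; omega
      · omega
    · intro x d
      show d ∈ (owner.insert n1 (owner.getD n1 [] ++ [nid])).getD x [] ↔ _
      rw [PySem.Dict.getD_insert, hitems]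
      by_cases hx : x = n1
      · subst hx
        rw [if_pos rfl]
        simp only [List.mem_append, List.mem_singleton]
        constructor
        · rintro (hd | hd)
          · obtain ⟨s, hs, hn⟩ := (h₄ x d).mp hd
            exact ⟨s, Or.inl hs, hn⟩
          · exact ⟨PySem.Set.ofList [x], Or.inr (by rw [hd]), (hmem1 x).mpr rfl⟩
        · rintro ⟨s, hs | hs, hn⟩
          · exact Or.inl ((h₄ x d).mpr ⟨s, hs, hn⟩)
          · have : d = nid := by
              have := congrArg Prod.fst hs
              simpa using this
            exact Or.inr this
      · rw [if_neg hx, h₄ x d]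
        constructor
        · rintro ⟨s, hs, hn⟩
          exact ⟨s, List.mem_append.mpr (Or.inl hs), hn⟩
        · rintro ⟨s, hs, hn⟩
          rcases List.mem_append.mp hs with hs | hs
          · exact ⟨s, hs, hn⟩
          · have hsn : s = PySem.Set.ofList [n1] := by
              have := congrArg Prod.snd (List.mem_singleton.mp hs)
              simpa using this
            rw [hsn] at hn
            exact absurd ((hmem1 x).mp hn) hx
    · intro q hq
      rw [hitems] at hq
      rcases List.mem_append.mp hq with hq | hq
      · exact h₅ q hq
      · rw [List.mem_singleton.mp hq]
        exact PySem.Set.nodup_ofList _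
  · -- merge step
    have hiso' : (n2 == -1) = false := by simpa using hiso
    obtain ⟨acl, hAeq, hAmem⟩ := stepA_merge_char n1 n2 cl hiso'
    obtain ⟨S, hBitems, hBnid, hSmem, hSnd, hBowner⟩ :=
      stepB_merge_char members owner nid n1 n2 hiso' h₂ h₃ h₄
    rw [hAeq]
    have hsub : ∀ k, k ∈ (members.items.filter
        (fun q => !decide (n1 ∈ q.2 ∨ n2 ∈ q.2))).map (·.1) → k ∈ members.keys := by
      intro k hk
      obtain ⟨q, hq, rfl⟩ := List.mem_map.mp hk
      show q.1 ∈ members.items.map (·.1)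
      exact List.mem_map.mpr ⟨q, (List.mem_filter.mp hq).1, rfl⟩
    refine ⟨?_, ?_, ?_, ?_, ?_⟩
    · show List.Forall₂ MemIff _ _
      rw [hBitems]
      refine forall2_append ?_ (List.forall₂_cons.mpr ⟨?_, List.Forall₂.nil⟩)
      · refine forall2_filter h₁ (fun a b hab _ _ => ?_)
        have : (n1 ∈ a ∨ n2 ∈ a) ↔ (n1 ∈ b.2 ∨ n2 ∈ b.2) := or_congr (hab n1) (hab n2)
        simp [this]
      · intro x
        rw [hAmem x, hSmem x]
        exact or_congr Iff.rfl (or_congr Iff.rfl (forall2_exists_iff n1 n2 x h₁))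
    · show List.Nodup _
      simp only [PySem.Dict.keys, hBitems, List.map_append, List.map_cons, List.map_nil]
      rw [List.nodup_append]
      refine ⟨?_, List.nodup_singleton _, ?_⟩
      · exact h₂.sublist (List.Sublist.map _ List.filter_sublist)
      · intro k hk j hj
        rw [List.mem_singleton] at hj
        intro he
        exact absurd (h₃ k (hsub k hk)) (by rw [he, hj]; exact lt_irrefl nid)
    · intro k hk
      rw [hBnid]
      simp only [PySem.Dict.keys, hBitems, List.map_append, List.map_cons, List.map_nil,
        List.mem_append, List.mem_singleton] at hk
      rcases hk with hk | hk
      · have := h₃ k (hsub k hk); omega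
      · omega
    · intro x d
      rw [hBowner x d, hBitems]
      by_cases hxS : x ∈ S
      · rw [if_pos hxS]
        constructor
        · rintro (hd | ⟨hd, hnp⟩)
          · exact ⟨S, List.mem_append.mpr (Or.inr (by rw [hd]; exact List.mem_singleton.mpr rfl)), hxS⟩
          · obtain ⟨s, hs, hxs⟩ := (h₄ x d).mp hd
            have hps : ¬(n1 ∈ s ∨ n2 ∈ s) := fun hp => hnp ⟨s, hs, hp⟩
            exact ⟨s, List.mem_append.mpr (Or.inl (List.mem_filter.mpr ⟨hs, by simp [hps]⟩)), hxs⟩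
        · rintro ⟨s, hs, hxs⟩
          rcases List.mem_append.mp hs with hs | hs
          · obtain ⟨hsm, hb⟩ := List.mem_filter.mp hs
            refine Or.inr ⟨(h₄ x d).mpr ⟨s, hsm, hxs⟩, ?_⟩
            rintro ⟨s', hs', hp'⟩
            have : s' = s := items_key_unique members h₂ hs' hsm
            rw [this] at hp'
            simp [hp'] at hb
          · have : d = nid := by
              have := congrArg Prod.fst (List.mem_singleton.mp hs)
              simpa using this
            exact Or.inl this
      · rw [if_neg hxS]
        constructor
        · intro hd
          obtain ⟨s, hs, hxs⟩ := (h₄ x d).mp hd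
          have hps : ¬(n1 ∈ s ∨ n2 ∈ s) := by
            intro hp
            exact hxS ((hSmem x).mpr (Or.inr (Or.inr ⟨(d, s), hs, hp, hxs⟩)))
          exact ⟨s, List.mem_append.mpr (Or.inl (List.mem_filter.mpr ⟨hs, by simp [hps]⟩)), hxs⟩
        · rintro ⟨s, hs, hxs⟩
          rcases List.mem_append.mp hs with hs | hs
          · exact (h₄ x d).mpr ⟨s, (List.mem_filter.mp hs).1, hxs⟩
          · have hsS : s = S := by
              have := congrArg Prod.snd (List.mem_singleton.mp hs)
              simpa using this
            rw [hsS] at hxs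
            exact absurd hxs hxS
    · intro q hq
      rw [hBitems] at hq
      rcases List.mem_append.mp hq with hq | hq
      · exact h₅ q (List.mem_filter.mp hq).1
      · rw [List.mem_singleton.mp hq]
        exact hSnd


theorem fold_preserves (l : List (Int × Int)) :
    ∀ cl st, InvBC cl st →
    InvBC (l.foldl (fun cl p => stepA_clusters p.1 p.2 cl) cl) (l.foldl stepB_clusters st) := by
  intro cl st h
  induction l generalizing cl st with
  | nil => exact h
  | cons p t ih => exact ih _ _ (step_preserves _ _ _ h)

-- A's initial cluster equals one A-step from nothing
theorem clusters0_eq (c0 : Int × Int) :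
    (if c0.2 == -1 then [[c0.1]] else [[c0.1, c0.2]]) = stepA_clusters c0.1 c0.2 [] := by
  by_cases h : c0.2 == -1 <;>
    simp [stepA_clusters, h, PySem.List.enumerate]

theorem inv_empty : InvBC [] (PySem.Dict.empty, PySem.Dict.empty, 0) := by
  refine ⟨List.Forall₂.nil, ?_, ?_, ?_, ?_⟩ <;>
    simp [PySem.Dict.empty, PySem.Dict.keys, PySem.Dict.getD, PySem.Dict.get?]

-- the coupled final states produce the same output list
theorem final_eq (cls : List (List Int)) (its : List (Int × List Int))
    (h : List.Forall₂ MemIff cls its) (hnd : ∀ q ∈ its, (q.2 : List Int).Nodup) :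
    cls.map (fun c => PySem.List.sorted (PySem.Set.ofList c) (fun x => x) false)
    = (its.map (·.2)).map (fun s => PySem.List.sorted s (fun x => x) false) := by
  induction h with
  | nil => simp
  | cons hR hF ih =>
    rename_i a b l₁ l₂
    simp only [List.map_cons, List.cons.injEq]
    constructor
    · apply (PySem.List.sorted_id_eq_sorted_id_iff_perm _ _).mpr
      apply (List.perm_ext_iff_of_nodup (PySem.Set.nodup_ofList a) (hnd b List.mem_cons_self)).mpr
      intro x
      rw [PySem.Set.mem_ofList]
      exact hR x
    · exact ih (fun q hq => hnd q (List.mem_cons_of_mem _ hq))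

-- ===== VERDICT (by name: the statement is the Claim_ definition above) =====
theorem clusters_from_chromosome_spec : Claim_equal_clusters_from_chromosome := by
  intro ch _ hpre
  unfold Spec_clusters_from_chromosome
  cases ch with
  | nil => exact absurd rfl hpre
  | cons c rest =>
    unfold clusters_from_chromosome clusters_from_chromosome_alt
    rw [PySem.List.enumerate_cons]
    simp only [List.foldl_cons]
    have hinv0 : InvBC (if ((0:Int), c).2 == -1 then [[((0:Int), c).1]] else [[((0:Int), c).1, ((0:Int), c).2]])
        (stepB_clusters (PySem.Dict.empty, PySem.Dict.empty, 0) ((0:Int), c)) := by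
      rw [clusters0_eq]
      exact step_preserves [] _ _ inv_empty
    have hinv := fold_preserves (PySem.List.enumerate rest (0 + 1)) _ _ hinv0
    obtain ⟨hF, _, _, _, hnd⟩ := hinv
    have := final_eq _ _ hF (fun q hq => hnd q hq)
    simpa [PySem.Dict.values] using this
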